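-- pv_equiv track=rewrite | github.com/GiseleBCSantos/ListaExerciciosJS-1 | Beecrowd/1024.py | obter_codificacao3
-- ===== SOURCE A (Python) =====
-- def obter_caractere_ascii(num):
--     return chr(num)
--
-- def obter_num_ascii(letra):
--     return ord(letra)
--
-- def eh_metade(index, length):
--     return index < int(length/2)
--
-- def obter_codificacao3(list):
--     new_list = []
--
--     for codigo in list:
--         new_codigo = ''
--         for i, l in enumerate(codigo):
--             if eh_metade(i, len(codigo)):
--                 new_codigo += l
--             else:
--                 new_codigo += obter_caractere_ascii(obter_num_ascii(l) - 1)
--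
--         new_list.append(new_codigo)
--
--     return new_list
-- ===== SOURCE B (Python) =====
-- def obter_codificacao3(list):
--     return [s[:len(s)//2] + ''.join(chr(ord(c) - 1) for c in s[len(s)//2:])
--             for s in list]
-- ===== Notes on version B (the rewrite author's own statement) =====
-- stated objective: simpler
-- what changed: Replaces the enumerated per-character loop with an index test by a single split at len//2: unchanged prefix slice plus a uniformly shifted suffix joined once, inlining the trivial chr/ord helpers.
import Mathlib
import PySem

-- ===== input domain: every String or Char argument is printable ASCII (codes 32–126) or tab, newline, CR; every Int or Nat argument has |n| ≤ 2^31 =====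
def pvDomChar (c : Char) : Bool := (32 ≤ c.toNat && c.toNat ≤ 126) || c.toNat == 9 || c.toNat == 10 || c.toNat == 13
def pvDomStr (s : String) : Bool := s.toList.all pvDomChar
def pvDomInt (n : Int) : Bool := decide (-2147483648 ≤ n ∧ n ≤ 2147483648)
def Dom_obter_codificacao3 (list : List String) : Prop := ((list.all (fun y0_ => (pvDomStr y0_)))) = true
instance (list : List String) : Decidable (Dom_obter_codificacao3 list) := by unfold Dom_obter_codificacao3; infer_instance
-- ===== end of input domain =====

-- B replaces A's enumerated loop with per-character index test by a split at len/2
-- (unchanged prefix ++ uniformly shifted suffix); objective: simpler.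


-- ===== PORT A =====
-- helper: chr(ord(l) - 1)  (obter_caractere_ascii ∘ obter_num_ascii, -1)
def pvShiftA (c : Char) : Char := Char.ofNat (c.toNat - 1)

-- helper: eh_metade(index, length) = index < int(length/2)  (length is a Nat ≥ 0, so int(length/2) = length / 2)
def ehMetade (index length : Nat) : Bool := index < length / 2

-- the inner 'for i, l in enumerate(codigo)' loop, building new_codigo char by char
def pvInnerA (length : Nat) : Nat → List Char → List Char → List Char
  | _, [], acc => acc
  | i, c :: rest, acc =>
      pvInnerA length (i + 1) rest (acc ++ (if ehMetade i length then [c] else [pvShiftA c]))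

def obter_codificacao3 (list : List String) : List String :=
  list.foldl (fun new_list codigo =>
    new_list ++ [String.ofList (pvInnerA codigo.toList.length 0 codigo.toList [])]) []

-- ===== PORT B =====
def obter_codificacao3_alt (list : List String) : List String :=
  list.map (fun s =>
    let half := s.toList.length / 2
    String.ofList (s.toList.take half ++ (s.toList.drop half).map (fun c => Char.ofNat (c.toNat - 1))))

-- ===== PRECONDITION & SPEC =====
def Spec_obter_codificacao3 (list : List String) (out : List String) : Prop := out = obter_codificacao3_alt list
instance (list : List String) (out : List String) : Decidable (Spec_obter_codificacao3 list out) := by unfold Spec_obter_codificacao3; infer_instance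

-- ===== CLAIM (what is proved, stated in full; the proofs are below) =====
def Claim_equal_obter_codificacao3 : Prop := ∀ (list : List String), Dom_obter_codificacao3 list → Spec_obter_codificacao3 list (obter_codificacao3 list)

-- ===== LEMMAS AND PROOFS =====
theorem pvInnerA_eq (h : Nat) : ∀ (cs : List Char) (i : Nat) (acc : List Char),
    pvInnerA h i cs acc = acc ++ cs.take (h / 2 - i) ++ (cs.drop (h / 2 - i)).map pvShiftA := by
  intro cs
  induction cs with
  | nil => intro i acc; simp [pvInnerA]
  | cons c rest ih =>
      intro i acc
      simp only [pvInnerA, ehMetade]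
      by_cases hi : i < h / 2
      · have hk : h / 2 - i = (h / 2 - (i + 1)) + 1 := by omega
        rw [ih (i + 1), hk]
        simp [List.take_succ_cons, List.drop_succ_cons, hi]
      · have hk : h / 2 - i = 0 := by omega
        have hk' : h / 2 - (i + 1) = 0 := by omega
        rw [ih (i + 1), hk, hk']
        simp [hi]

theorem foldl_append_map {α β : Type} (f : α → β) :
    ∀ (xs : List α) (acc : List β), xs.foldl (fun a x => a ++ [f x]) acc = acc ++ xs.map f := by
  intro xs
  induction xs with
  | nil => simp
  | cons x rest ih => intro acc; simp [List.foldl, ih]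

-- ===== VERDICT (by name: the statement is the Claim_ definition above) =====
theorem obter_codificacao3_spec : Claim_equal_obter_codificacao3 := by
  intro list _
  unfold Spec_obter_codificacao3 obter_codificacao3 obter_codificacao3_alt
  rw [foldl_append_map]
  simp only [List.nil_append]
  apply List.map_congr_left
  intro s _
  rw [pvInnerA_eq]
  simp only [Nat.sub_zero, List.nil_append]
  rfl
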